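-- pv_equiv track=rewrite | github.com/broadinstitute/gatk-sv | src/sv-pipeline/02_evidence_assessment/02c_srtest/script/sr_merge_allosomes.py | merge_info
-- ===== SOURCE A (Python) =====
-- def unify_list(list):
--     out = []
--     for i in list:
--         if i not in out:
--             out.append(i)
--     return out
--
-- def flag_record(record):
--     # eg of record: ['MERGED_X_8601', '0.0', '0.0', '0.0']
--     # return 'False' if 'NA' or '0.0' in record; else 'True'
--     out = 'True'
--     if record[2] in ['NA', '0.0'] and record[3] in ['NA', '0.0'] and record[4] in ['NA', '0.0'] and record[5] in ['NA', '0.0']: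
--         out = 'False'
--     return out
--
-- def merge_info(fe_info, ma_info):
--     out = [fe_info[0]]
--     out_key = unify_list([i[0] for i in fe_info[1:]] + [i[0]
--                                                         for i in ma_info[1:]])
--     out_hash = {}
--     for i in fe_info:
--         out_hash[i[0]] = []
--         out_hash[i[0]].append(i)
--     for i in ma_info:
--         if not i[0] in out_hash.keys():
--             out_hash[i[0]] = []
--         out_hash[i[0]].append(i)
--     for i in out_hash.keys():
--         if len(out_hash[i]) == 1:
--             continue
--         elif flag_record(out_hash[i][0]) == 'False':
--             out_hash[i] = [out_hash[i][1]]
--         else: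
--             out_hash[i] = [out_hash[i][0]]
--     for i in out_key:
--         out += out_hash[i]
--     return out
-- ===== SOURCE B (Python) =====
-- def flag_record(record):
--     # return 'False' if fields 2..5 are all 'NA'/'0.0'; else 'True'
--     out = 'True'
--     if record[2] in ['NA', '0.0'] and record[3] in ['NA', '0.0'] and record[4] in ['NA', '0.0'] and record[5] in ['NA', '0.0']:
--         out = 'False'
--     return out
--
-- def merge_info(fe_info, ma_info):
--     def pick(key):
--         fe_last = next((r for r in reversed(fe_info) if r[0] == key), None)
--         ma_matches = [r for r in ma_info if r[0] == key]
--         if fe_last is None: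
--             if len(ma_matches) > 1 and flag_record(ma_matches[0]) == 'False':
--                 return ma_matches[1]
--             return ma_matches[0]
--         if ma_matches and flag_record(fe_last) == 'False':
--             return ma_matches[0]
--         return fe_last
--     out = [fe_info[0]]
--     seen = set()
--     for r in fe_info[1:] + ma_info[1:]:
--         if r[0] not in seen:
--             seen.add(r[0])
--             out.append(pick(r[0]))
--     return out
-- ===== Notes on version B (the rewrite author's own statement) =====
-- stated objective: alternative
-- what changed: Replaces A's three mutable-dict passes (group records by key with reset-on-fe-duplicate, then destructively resolve each group, then emit via a dict lookup per key) by a per-key functional resolver that searches for the last fe_info match and the ma_info matches directly, applied once per key in first-appearance order with a seen-set.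
import Mathlib
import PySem

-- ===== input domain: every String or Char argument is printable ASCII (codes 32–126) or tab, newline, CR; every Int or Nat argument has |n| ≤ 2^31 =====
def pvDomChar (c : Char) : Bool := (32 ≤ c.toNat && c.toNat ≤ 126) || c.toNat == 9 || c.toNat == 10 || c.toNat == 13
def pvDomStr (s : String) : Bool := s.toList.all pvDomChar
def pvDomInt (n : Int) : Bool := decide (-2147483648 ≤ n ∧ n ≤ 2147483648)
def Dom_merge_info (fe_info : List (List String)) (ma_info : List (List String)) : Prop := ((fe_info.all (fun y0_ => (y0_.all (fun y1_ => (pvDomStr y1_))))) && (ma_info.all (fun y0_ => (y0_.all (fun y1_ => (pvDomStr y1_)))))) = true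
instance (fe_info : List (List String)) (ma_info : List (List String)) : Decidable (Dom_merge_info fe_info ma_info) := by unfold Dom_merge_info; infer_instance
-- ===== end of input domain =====

-- B replaces A's three mutable-dict grouping/resolution passes by a per-key functional
-- resolver (last fe match + ma matches, computed by search) applied once per key in
-- first-appearance order (objective: alternative decomposition, not speed).

-- shared helper: r[0] (Pre_ guarantees every record is nonempty)
def pvKey (r : List String) : String := (PySem.List.pyGet? r 0).getD ""


-- ===== PORT A =====
def unify_list (l : List String) : List String :=
  l.foldl (fun out i => if out.contains i then out else out ++ [i]) []

def flag_record (record : List String) : String :=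
  if (PySem.List.pyGet? record 2).getD "" ∈ ["NA", "0.0"] ∧
     (PySem.List.pyGet? record 3).getD "" ∈ ["NA", "0.0"] ∧
     (PySem.List.pyGet? record 4).getD "" ∈ ["NA", "0.0"] ∧
     (PySem.List.pyGet? record 5).getD "" ∈ ["NA", "0.0"] then "False" else "True"

-- body of A's third loop: 'if len(out_hash[i]) == 1: continue; elif flag_record(...) == "False": out_hash[i] = [out_hash[i][1]]; else: out_hash[i] = [out_hash[i][0]]'
def resStep (d : PySem.Dict String (List (List String))) (q : String) : PySem.Dict String (List (List String)) :=
  let g := d.getD q []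
  if g.length == 1 then d
  else if flag_record ((PySem.List.pyGet? g 0).getD []) == "False" then
    d.insert q [(PySem.List.pyGet? g 1).getD []]
  else
    d.insert q [(PySem.List.pyGet? g 0).getD []]

def merge_info (fe_info : List (List String)) (ma_info : List (List String)) : List (List String) :=
  -- out = [fe_info[0]]
  let out0 : List (List String) := [(PySem.List.pyGet? fe_info 0).getD []]
  -- out_key = unify_list([i[0] for i in fe_info[1:]] + [i[0] for i in ma_info[1:]])
  let out_key := unify_list ((PySem.List.slice fe_info (some 1) none).map pvKey ++
                             (PySem.List.slice ma_info (some 1) none).map pvKey)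
  -- for i in fe_info: out_hash[i[0]] = []; out_hash[i[0]].append(i)
  let d1 := fe_info.foldl
    (fun d i => (d.insert (pvKey i) ([] : List (List String))).modify (pvKey i) [] (fun g => g ++ [i]))
    PySem.Dict.empty
  -- for i in ma_info: if not i[0] in out_hash.keys(): out_hash[i[0]] = []; out_hash[i[0]].append(i)
  let d2 := ma_info.foldl
    (fun d i => (if d.contains (pvKey i) then d else d.insert (pvKey i) []).modify (pvKey i) [] (fun g => g ++ [i]))
    d1
  -- for i in out_hash.keys(): resolve groups of size ≥ 2 to one record (loop body = resStep above)
  let d3 := d2.keys.foldl resStep d2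
  -- for i in out_key: out += out_hash[i]
  out_key.foldl (fun out q => out ++ d3.getD q []) out0

-- ===== PORT B =====
def pick (fe_info ma_info : List (List String)) (key : String) : List String :=
  match fe_info.reverse.find? (fun r => pvKey r == key) with
  | none =>
      let ma_matches := ma_info.filter (fun r => pvKey r == key)
      if 1 < ma_matches.length ∧
         flag_record ((PySem.List.pyGet? ma_matches 0).getD []) == "False" then
        (PySem.List.pyGet? ma_matches 1).getD []
      else (PySem.List.pyGet? ma_matches 0).getD []
  | some fe_last =>
      let ma_matches := ma_info.filter (fun r => pvKey r == key)
      if ¬ ma_matches.isEmpty ∧ flag_record fe_last == "False" then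
        (PySem.List.pyGet? ma_matches 0).getD []
      else fe_last

def merge_info_alt (fe_info : List (List String)) (ma_info : List (List String)) : List (List String) :=
  let out0 : List (List String) := [(PySem.List.pyGet? fe_info 0).getD []]
  ((PySem.List.slice fe_info (some 1) none ++ PySem.List.slice ma_info (some 1) none).foldl
    (fun (acc : List (List String) × PySem.Set String) r =>
      if acc.2.contains (pvKey r) then acc
      else (acc.1 ++ [pick fe_info ma_info (pvKey r)], PySem.Set.add acc.2 (pvKey r)))
    (out0, PySem.Set.empty)).1

-- ===== PRECONDITION & SPEC =====
-- the record group A builds for key q: last fe_info record with that key (if any), then all ma_info records with it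
def pvGrp (fe_info ma_info : List (List String)) (q : String) : List (List String) :=
  (match fe_info.reverse.find? (fun r => pvKey r == q) with
   | some r => [r]
   | none => []) ++ ma_info.filter (fun r => pvKey r == q)

-- Pre_ excludes exactly the inputs where Python A raises IndexError: empty fe_info (fe_info[0]),
-- an empty record (i[0]), or a group of ≥ 2 records whose head record makes flag_record's
-- short-circuiting 'and' chain over record[2..5] run off the end (i.e. the head has < 6 fields
-- and no field from index 2 on breaks the chain).
def Pre_merge_info (fe_info : List (List String)) (ma_info : List (List String)) : Prop :=
  fe_info ≠ [] ∧ (∀ r ∈ fe_info ++ ma_info, r ≠ []) ∧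
  ∀ q ∈ (fe_info ++ ma_info).map pvKey,
    2 ≤ (pvGrp fe_info ma_info q).length →
      (6 ≤ ((pvGrp fe_info ma_info q).headD []).length ∨
       ∃ x ∈ ((pvGrp fe_info ma_info q).headD []).drop 2, x ∉ (["NA", "0.0"] : List String))

instance (fe_info : List (List String)) (ma_info : List (List String)) : Decidable (Pre_merge_info fe_info ma_info) := by unfold Pre_merge_info; infer_instance

def pvWitness_merge_info : List (List String) × List (List String) :=
  ([["h"], ["k", "a", "NA", "0.0", "NA", "NA"]], [["h2"], ["k", "b", "1", "1", "1", "1"]])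

def Spec_merge_info (fe_info : List (List String)) (ma_info : List (List String)) (out : List (List String)) : Prop := out = merge_info_alt fe_info ma_info
instance (fe_info : List (List String)) (ma_info : List (List String)) (out : List (List String)) : Decidable (Spec_merge_info fe_info ma_info out) := by unfold Spec_merge_info; infer_instance

-- ===== CLAIM (what is proved, stated in full; the proofs are below) =====
def Claim_equal_merge_info : Prop := ∀ (fe_info : List (List String)) (ma_info : List (List String)), Dom_merge_info fe_info ma_info → Pre_merge_info fe_info ma_info → Spec_merge_info fe_info ma_info (merge_info fe_info ma_info)

-- ===== LEMMAS AND PROOFS =====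

-- first occurrences of l not already in s, in order
def dedupFrom : List String → List String → List String
  | [], _ => []
  | x :: t, s => if x ∈ s then dedupFrom t s else x :: dedupFrom t (s ++ [x])

theorem mem_dedupFrom {q : String} : ∀ (l s : List String), q ∈ dedupFrom l s → q ∈ l := by
  intro l
  induction l with
  | nil => intro s h; simp [dedupFrom] at h
  | cons x t ih =>
    intro s h
    simp only [dedupFrom] at h
    by_cases hc : x ∈ s
    · rw [if_pos hc] at h; exact List.mem_cons_of_mem _ (ih _ h)
    · rw [if_neg hc] at h
      rcases List.mem_cons.mp h with h | h
      · exact h ▸ List.mem_cons_self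
      · exact List.mem_cons_of_mem _ (ih _ h)

-- A's unify_list loop, from an arbitrary accumulator
theorem unify_foldl : ∀ (l s : List String),
    l.foldl (fun out i => if out.contains i then out else out ++ [i]) s = s ++ dedupFrom l s := by
  intro l
  induction l with
  | nil => intro s; simp [dedupFrom]
  | cons x t ih =>
    intro s
    simp only [List.foldl_cons, dedupFrom]
    by_cases hc : x ∈ s
    · rw [if_pos (by simpa [List.contains_eq_mem] using hc), ih, if_pos hc]
    · rw [if_neg (by simpa [List.contains_eq_mem] using hc), ih, if_neg hc]
      simp

-- one step of A's fe_info grouping loop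
theorem getD_festep (d : PySem.Dict String (List (List String))) (r : List String) (q : String) :
    ((d.insert (pvKey r) ([] : List (List String))).modify (pvKey r) [] (fun g => g ++ [r])).getD q []
      = if q = pvKey r then [r] else d.getD q [] := by
  by_cases h : q = pvKey r
  · simp [h]
  · simp [h, PySem.Dict.getD_modify, PySem.Dict.getD_insert]

-- A's fe_info loop keeps exactly the LAST record of each key
theorem getD_fefold : ∀ (fe : List (List String)) (d : PySem.Dict String (List (List String))) (q : String),
    (fe.foldl (fun d i => (d.insert (pvKey i) ([] : List (List String))).modify (pvKey i) [] (fun g => g ++ [i])) d).getD q []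
      = (match fe.reverse.find? (fun r => pvKey r == q) with
         | some r => [r]
         | none => d.getD q []) := by
  intro fe
  induction fe with
  | nil => intro d q; simp
  | cons r t ih =>
    intro d q
    simp only [List.foldl_cons, List.reverse_cons, List.find?_append, ih]
    cases hfind : t.reverse.find? (fun r => pvKey r == q) with
    | some x => simp [Option.or]
    | none =>
      simp only [Option.none_or, List.find?_cons, List.find?_nil]
      by_cases h : pvKey r = q
      · simp [h]
      · have h' : q ≠ pvKey r := fun e => h e.symm
        have hb : (pvKey r == q) = false := by simp [h]
        simp [hb, getD_festep, h']

-- one step of A's ma_info append loop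
theorem getD_mastep (d : PySem.Dict String (List (List String))) (r : List String) (q : String) :
    ((if d.contains (pvKey r) then d else d.insert (pvKey r) []).modify (pvKey r) [] (fun g => g ++ [r])).getD q []
      = if q = pvKey r then d.getD q [] ++ [r] else d.getD q [] := by
  by_cases hc : d.contains (pvKey r)
  · by_cases h : q = pvKey r <;> simp [hc, h, PySem.Dict.getD_modify]
  · have hz : d.getD (pvKey r) [] = [] := PySem.Dict.getD_of_not_contains d [] (by simpa using hc)
    by_cases h : q = pvKey r <;>
      simp [hc, h, PySem.Dict.getD_modify, PySem.Dict.getD_insert, hz]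

-- A's ma_info loop appends all matching records in order
theorem getD_mafold : ∀ (ma : List (List String)) (d : PySem.Dict String (List (List String))) (q : String),
    (ma.foldl (fun d i => (if d.contains (pvKey i) then d else d.insert (pvKey i) []).modify (pvKey i) [] (fun g => g ++ [i])) d).getD q []
      = d.getD q [] ++ ma.filter (fun r => pvKey r == q) := by
  intro ma
  induction ma with
  | nil => intro d q; simp
  | cons r t ih =>
    intro d q
    simp only [List.foldl_cons, ih, getD_mastep, List.filter_cons]
    by_cases h : pvKey r = q
    · simp [h]
    · have h' : q ≠ pvKey r := fun e => h e.symm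
      simp [h, h']

theorem contains_festep (d : PySem.Dict String (List (List String))) (r : List String) (q : String) :
    ((d.insert (pvKey r) ([] : List (List String))).modify (pvKey r) [] (fun g => g ++ [r])).contains q
      = (q == pvKey r || d.contains q) := by
  simp [PySem.Dict.contains_modify, PySem.Dict.contains_insert]

theorem contains_mastep (d : PySem.Dict String (List (List String))) (r : List String) (q : String) :
    ((if d.contains (pvKey r) then d else d.insert (pvKey r) []).modify (pvKey r) [] (fun g => g ++ [r])).contains q
      = (q == pvKey r || d.contains q) := by
  by_cases hc : d.contains (pvKey r)
  · simp only [hc, if_true, PySem.Dict.contains_modify]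
  · simp [PySem.Dict.contains_modify, PySem.Dict.contains_insert, hc]

theorem contains_fefold : ∀ (fe : List (List String)) (d : PySem.Dict String (List (List String))) (q : String),
    (fe.foldl (fun d i => (d.insert (pvKey i) ([] : List (List String))).modify (pvKey i) [] (fun g => g ++ [i])) d).contains q
      = (d.contains q || (fe.map pvKey).contains q) := by
  intro fe
  induction fe with
  | nil => intro d q; simp
  | cons r t ih =>
    intro d q
    simp only [List.foldl_cons, ih, contains_festep, List.map_cons, List.contains_cons]
    cases hq : (q == pvKey r) <;> simp

theorem contains_mafold : ∀ (ma : List (List String)) (d : PySem.Dict String (List (List String))) (q : String),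
    (ma.foldl (fun d i => (if d.contains (pvKey i) then d else d.insert (pvKey i) []).modify (pvKey i) [] (fun g => g ++ [i])) d).contains q
      = (d.contains q || (ma.map pvKey).contains q) := by
  intro ma
  induction ma with
  | nil => intro d q; simp
  | cons r t ih =>
    intro d q
    simp only [List.foldl_cons, ih, contains_mastep, List.map_cons, List.contains_cons]
    cases hq : (q == pvKey r) <;> simp

theorem nodup_festep (d : PySem.Dict String (List (List String))) (r : List String)
    (h : d.keys.Nodup) :
    ((d.insert (pvKey r) ([] : List (List String))).modify (pvKey r) [] (fun g => g ++ [r])).keys.Nodup := by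
  rw [PySem.Dict.keys_modify]
  exact PySem.Dict.nodup_keys_insert _ _ _ (PySem.Dict.nodup_keys_insert _ _ _ h)

theorem nodup_mastep (d : PySem.Dict String (List (List String))) (r : List String)
    (h : d.keys.Nodup) :
    ((if d.contains (pvKey r) then d else d.insert (pvKey r) []).modify (pvKey r) [] (fun g => g ++ [r])).keys.Nodup := by
  rw [PySem.Dict.keys_modify]
  by_cases hc : d.contains (pvKey r)
  · simp only [hc, if_true]
    exact PySem.Dict.nodup_keys_insert _ _ _ h
  · simp only [hc, if_false, Bool.false_eq_true]
    exact PySem.Dict.nodup_keys_insert _ _ _ (PySem.Dict.nodup_keys_insert _ _ _ h)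

theorem nodup_fefold : ∀ (fe : List (List String)) (d : PySem.Dict String (List (List String))),
    d.keys.Nodup →
    (fe.foldl (fun d i => (d.insert (pvKey i) ([] : List (List String))).modify (pvKey i) [] (fun g => g ++ [i])) d).keys.Nodup := by
  intro fe
  induction fe with
  | nil => intro d h; simpa using h
  | cons r t ih => intro d h; exact ih _ (nodup_festep d r h)

theorem nodup_mafold : ∀ (ma : List (List String)) (d : PySem.Dict String (List (List String))),
    d.keys.Nodup →
    (ma.foldl (fun d i => (if d.contains (pvKey i) then d else d.insert (pvKey i) []).modify (pvKey i) [] (fun g => g ++ [i])) d).keys.Nodup := by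
  intro ma
  induction ma with
  | nil => intro d h; simpa using h
  | cons r t ih => intro d h; exact ih _ (nodup_mastep d r h)

-- the single-group resolution A's third loop performs
def resolveFn (g : List (List String)) : List (List String)  :=
  if g.length == 1 then g
  else if flag_record ((PySem.List.pyGet? g 0).getD []) == "False" then [(PySem.List.pyGet? g 1).getD []]
  else [(PySem.List.pyGet? g 0).getD []]

theorem getD_resstep (d : PySem.Dict String (List (List String))) (k q : String) :
    (resStep d k).getD q []
      = if q = k then resolveFn (d.getD k []) else d.getD q [] := by
  simp only [resStep, resolveFn]
  by_cases hq : q = k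
  · subst hq
    split_ifs <;> simp_all
  · split_ifs <;> simp [PySem.Dict.getD_insert, hq]

theorem getD_resfold : ∀ (ks : List String) (d : PySem.Dict String (List (List String))) (q : String),
    ks.Nodup →
    (ks.foldl resStep d).getD q []
      = if q ∈ ks then resolveFn (d.getD q []) else d.getD q [] := by
  intro ks
  induction ks with
  | nil => intro d q _; simp
  | cons k t ih =>
    intro d q h
    obtain ⟨hk, ht⟩ := List.nodup_cons.mp h
    rw [List.foldl_cons, ih _ _ ht, getD_resstep]
    by_cases hq : q ∈ t
    · have hne : q ≠ k := fun e => hk (e ▸ hq)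
      rw [if_pos hq, if_neg hne, if_pos (List.mem_cons_of_mem _ hq)]
    · by_cases hqk : q = k
      · subst hqk
        rw [if_neg hq, if_pos rfl, if_pos List.mem_cons_self]
      · rw [if_neg hq, if_neg hqk, if_neg (by simp [List.mem_cons, hqk, hq])]

-- pointwise agreement of A's resolution with B's pick, for any key of some record
theorem resolve_eq_pick (fe ma : List (List String)) (q : String)
    (hq : q ∈ (fe ++ ma).map pvKey) :
    resolveFn (pvGrp fe ma q) = [pick fe ma q] := by
  unfold pvGrp pick
  cases hfind : fe.reverse.find? (fun r => pvKey r == q) with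
  | some fl =>
    cases hm : ma.filter (fun r => pvKey r == q) with
    | nil => simp [resolveFn]
    | cons m0 mt =>
      have h0 : (PySem.List.pyGet? (fl :: m0 :: mt) 0).getD [] = fl := by
        rw [PySem.List.pyGet?_zero_cons]; rfl
      have h1 : (PySem.List.pyGet? (fl :: m0 :: mt) 1).getD [] = m0 := by
        simp [pysem]
      have h0m : (PySem.List.pyGet? (m0 :: mt) 0).getD [] = m0 := by
        rw [PySem.List.pyGet?_zero_cons]; rfl
      have hlen : ((fl :: m0 :: mt).length == 1) = false := by simp
      simp only [resolveFn, List.cons_append, List.nil_append, h0, h1, h0m,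
        List.isEmpty_cons, hlen, Bool.false_eq_true, if_false]
      split_ifs <;> simp_all
  | none =>
    have hma : ∃ r ∈ ma, pvKey r = q := by
      simp only [List.map_append, List.mem_append, List.mem_map] at hq
      rcases hq with ⟨r, hr, hrq⟩ | ⟨r, hr, hrq⟩
      · exfalso
        have := List.find?_eq_none.mp hfind r (List.mem_reverse.mpr hr)
        simp [hrq] at this
      · exact ⟨r, hr, hrq⟩
    cases hm : ma.filter (fun r => pvKey r == q) with
    | nil =>
      exfalso
      rcases hma with ⟨r, hr, hrq⟩
      have : r ∈ ma.filter (fun r => pvKey r == q) := by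
        simp [List.mem_filter, hr, hrq]
      rw [hm] at this; simp at this
    | cons m0 mt =>
      cases mt with
      | nil =>
        have h0 : (PySem.List.pyGet? [m0] 0).getD [] = m0 := by
          rw [PySem.List.pyGet?_zero_cons]; rfl
        simp [resolveFn]
      | cons m1 mt' =>
        have h0 : (PySem.List.pyGet? (m0 :: m1 :: mt') 0).getD [] = m0 := by
          rw [PySem.List.pyGet?_zero_cons]; rfl
        have h1 : (PySem.List.pyGet? (m0 :: m1 :: mt') 1).getD [] = m1 := by
          simp [pysem]
        have hlen : ((m0 :: m1 :: mt').length == 1) = false := by simp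
        have hlt : 1 < (m0 :: m1 :: mt').length := by simp
        simp only [resolveFn, List.nil_append, h0, h1, hlen, Bool.false_eq_true,
          if_false, hlt, true_and]
        split_ifs <;> rfl

-- B's emit loop, from arbitrary accumulators
theorem emit_foldl (fe ma : List (List String)) :
    ∀ (l : List (List String)) (out : List (List String)) (s : PySem.Set String),
    ((l.foldl
      (fun (acc : List (List String) × PySem.Set String) r =>
        if PySem.Set.contains acc.2 (pvKey r) then acc
        else (acc.1 ++ [pick fe ma (pvKey r)], PySem.Set.add acc.2 (pvKey r)))
      (out, s)).1)
      = out ++ (dedupFrom (l.map pvKey) s).map (pick fe ma) := by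
  intro l
  induction l with
  | nil => intro out s; simp [dedupFrom]
  | cons r t ih =>
    intro out s
    simp only [List.foldl_cons, List.map_cons, dedupFrom]
    by_cases hc : pvKey r ∈ s
    · have hcb : PySem.Set.contains s (pvKey r) = true := by
        simp [PySem.Set.contains, List.contains_eq_mem, hc]
      simp only [hcb, if_true, if_pos hc]
      rw [ih]
    · have hcb : PySem.Set.contains s (pvKey r) = false := by
        simp [PySem.Set.contains, List.contains_eq_mem, hc]
      have hadd : PySem.Set.add s (pvKey r) = s ++ [pvKey r] := by
        simp [PySem.Set.add, PySem.Set.contains, List.contains_eq_mem, hc]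
      simp only [hcb, Bool.false_eq_true, if_false, if_neg hc, hadd]
      rw [ih]
      simp

theorem flatMap_eq_map (f : String → List String) (g : String → List (List String)) :
    ∀ (l : List String), (∀ q ∈ l, g q = [f q]) → l.flatMap g = l.map f := by
  intro l
  induction l with
  | nil => intro _; simp
  | cons x t ih =>
    intro h
    simp only [List.flatMap_cons, List.map_cons, h x List.mem_cons_self,
      ih (fun q hq => h q (List.mem_cons_of_mem _ hq))]
    simp

-- the heart of the file: the two ports agree on EVERY input (Pre_ is only needed
-- so the Python original returns at all)
theorem merge_info_eq_alt (fe_info ma_info : List (List String)) :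
    merge_info fe_info ma_info = merge_info_alt fe_info ma_info := by
  simp only [merge_info, merge_info_alt, unify_list, PySem.List.slice_from_one]
  rw [PySem.List.foldl_append_eq_flatMap, unify_foldl, emit_foldl, List.nil_append, List.map_append]
  congr 1
  apply flatMap_eq_map (pick fe_info ma_info)
  intro q hq
  have hql : q ∈ fe_info.tail.map pvKey ++ ma_info.tail.map pvKey := mem_dedupFrom _ _ hq
  have hqm : q ∈ (fe_info ++ ma_info).map pvKey := by
    simp only [List.map_append, List.mem_append, List.mem_map] at hql ⊢
    rcases hql with ⟨r, hr, hrq⟩ | ⟨r, hr, hrq⟩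
    · exact Or.inl ⟨r, List.mem_of_mem_tail hr, hrq⟩
    · exact Or.inr ⟨r, List.mem_of_mem_tail hr, hrq⟩
  -- q is a key of the dict built by the first two loops
  have hcont :
      (ma_info.foldl (fun d i => (if d.contains (pvKey i) then d else d.insert (pvKey i) []).modify (pvKey i) [] (fun g => g ++ [i]))
        (fe_info.foldl (fun d i => (d.insert (pvKey i) ([] : List (List String))).modify (pvKey i) [] (fun g => g ++ [i])) PySem.Dict.empty)).contains q = true := by
    rw [contains_mafold, contains_fefold]
    simp only [PySem.Dict.contains_empty, Bool.false_or]
    simp only [List.map_append, List.mem_append, List.mem_map] at hqm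
    rcases hqm with ⟨r, hr, hrq⟩ | ⟨r, hr, hrq⟩
    · simp only [List.contains_eq_mem, List.mem_map, Bool.or_eq_true, decide_eq_true_eq]
      exact Or.inl ⟨r, hr, hrq⟩
    · simp only [List.contains_eq_mem, List.mem_map, Bool.or_eq_true, decide_eq_true_eq]
      exact Or.inr ⟨r, hr, hrq⟩
  have hnd :
      (ma_info.foldl (fun d i => (if d.contains (pvKey i) then d else d.insert (pvKey i) []).modify (pvKey i) [] (fun g => g ++ [i]))
        (fe_info.foldl (fun d i => (d.insert (pvKey i) ([] : List (List String))).modify (pvKey i) [] (fun g => g ++ [i])) PySem.Dict.empty)).keys.Nodup :=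
    nodup_mafold _ _ (nodup_fefold _ _ PySem.Dict.nodup_keys_empty)
  have hmemk := (PySem.Dict.contains_iff_mem_keys _ _).mp hcont
  rw [getD_resfold _ _ _ hnd, if_pos hmemk, getD_mafold, getD_fefold]
  have hgrp :
      (match fe_info.reverse.find? (fun r => pvKey r == q) with
        | some r => [r]
        | none => (PySem.Dict.empty : PySem.Dict String (List (List String))).getD q []) ++ ma_info.filter (fun r => pvKey r == q)
      = pvGrp fe_info ma_info q := by
    unfold pvGrp
    cases fe_info.reverse.find? (fun r => pvKey r == q) <;> simp
  rw [hgrp]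
  exact resolve_eq_pick fe_info ma_info q hqm


-- ===== VERDICT (by name: the statement is the Claim_ definition above) =====
theorem merge_info_spec : Claim_equal_merge_info := by
  intro fe_info ma_info _ _
  unfold Spec_merge_info
  exact merge_info_eq_alt fe_info ma_info
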